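-- pv_equiv track=rewrite | github.com/tynnp/Practice | UPCODER/Other/TrucMy05.py | solve
-- ===== SOURCE A (Python) =====
-- def solve(strA, strB, MOD):
--     A = 0
--     for x in strA:
--         A = (A * 10 + int(x)) % MOD
--
--     res = 1
--     for x in strB:
--         res = pow(res, 10, MOD) * pow(A, int(x), MOD) % MOD
--
--     return res
-- ===== SOURCE B (Python) =====
-- def solve(strA, strB, MOD):
--     A = 0
--     for x in strA:
--         A = (A * 10 + int(x)) % MOD
--     if not strB:
--         return 1
--     E = 0
--     for x in strB:
--         E = E * 10 + int(x)
--     res = 1 % MOD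
--     base = A % MOD
--     while E:
--         if E & 1:
--             res = res * base % MOD
--         base = base * base % MOD
--         E >>= 1
--     return res
-- ===== Notes on version B (the rewrite author's own statement) =====
-- stated objective: alternative
-- what changed: B keeps the Horner reduction of strA but replaces A's per-digit modular-exponentiation loop over strB (two modular pows per decimal digit, nesting the exponent by powers of 10) by accumulating the exponent E as one plain integer and computing A^E mod MOD with a single binary square-and-multiply loop over the bits of E, returning 1 directly for an empty exponent string.
import Mathlib
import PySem

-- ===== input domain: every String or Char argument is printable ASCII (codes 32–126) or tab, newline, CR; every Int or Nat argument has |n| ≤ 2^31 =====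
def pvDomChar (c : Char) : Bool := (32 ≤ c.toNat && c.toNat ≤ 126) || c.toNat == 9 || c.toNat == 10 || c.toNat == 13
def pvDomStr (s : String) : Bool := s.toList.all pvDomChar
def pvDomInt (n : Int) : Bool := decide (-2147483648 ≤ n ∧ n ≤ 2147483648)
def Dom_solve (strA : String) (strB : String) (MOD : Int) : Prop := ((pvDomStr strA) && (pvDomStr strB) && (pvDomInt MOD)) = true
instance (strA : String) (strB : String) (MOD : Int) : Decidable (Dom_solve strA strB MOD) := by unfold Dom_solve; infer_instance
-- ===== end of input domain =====

-- B replaces A's per-digit modular-exponentiation loop (two pows per digit) by accumulating the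
-- full integer exponent E and doing a single modular power pow(A, E, MOD); same values on Pre_.


-- ===== PORT A =====
-- int(x) for a single character x; `none` (Python ValueError) is excluded by Pre_solve
def pyDigitInt (x : Char) : Int := (PySem.Int.ofStr? (String.ofList [x])).getD 0

def solve (strA : String) (strB : String) (MOD : Int) : Int :=
  let A := strA.toList.foldl (fun a x => PySem.Int.mod (a * 10 + pyDigitInt x) MOD) 0
  strB.toList.foldl
    (fun res x =>
      PySem.Int.mod (PySem.Int.powMod res 10 MOD * PySem.Int.powMod A (pyDigitInt x).toNat MOD) MOD)
    1

-- ===== PORT B =====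
-- B-side helper: Source B's while-loop (square-and-multiply).  Python's `while E:` is transcribed
-- as `0 < E` so the recursion is well-founded; the two agree whenever int(x) returned for every
-- digit, since then E, built from digit values 0..9, is nonnegative.
def powLoop (MOD res base E : Int) : Int :=
  if _h : 0 < E then
    powLoop MOD (if PySem.Int.band E 1 ≠ 0 then PySem.Int.mod (res * base) MOD else res)
      (PySem.Int.mod (base * base) MOD) (PySem.Int.floordiv E 2)
  else res
termination_by E.toNat
decreasing_by
  rw [PySem.Int.floordiv_eq_ediv_of_pos (by norm_num)]
  omega

def solve_alt (strA : String) (strB : String) (MOD : Int) : Int :=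
  let A := strA.toList.foldl (fun a x => PySem.Int.mod (a * 10 + pyDigitInt x) MOD) 0
  if strB.toList.isEmpty then 1
  else
    let E := strB.toList.foldl (fun e x => e * 10 + pyDigitInt x) 0
    powLoop MOD (PySem.Int.mod 1 MOD) (PySem.Int.mod A MOD) E

-- ===== PRECONDITION & SPEC =====
-- Pre_ excludes exactly the inputs where A raises: a non-digit character in strA or strB
-- (int(x) raises ValueError) and MOD = 0 with at least one character (the first '%' or pow
-- raises ZeroDivisionError); A returns on every input Pre_ admits.
def Pre_solve (strA : String) (strB : String) (MOD : Int) : Prop :=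
  strA.toList.all Char.isDigit = true ∧ strB.toList.all Char.isDigit = true ∧
    (MOD ≠ 0 ∨ (strA.toList = [] ∧ strB.toList = []))
instance (strA : String) (strB : String) (MOD : Int) : Decidable (Pre_solve strA strB MOD) := by unfold Pre_solve; infer_instance

def pvWitness_solve : String × String × Int := ("123", "45", 7)

def Spec_solve (strA : String) (strB : String) (MOD : Int) (out : Int) : Prop := out = solve_alt strA strB MOD
instance (strA : String) (strB : String) (MOD : Int) (out : Int) : Decidable (Spec_solve strA strB MOD out) := by unfold Spec_solve; infer_instance

-- ===== CLAIM (what is proved, stated in full; the proofs are below) =====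
def Claim_equal_solve : Prop := ∀ (strA : String) (strB : String) (MOD : Int), Dom_solve strA strB MOD → Pre_solve strA strB MOD → Spec_solve strA strB MOD (solve strA strB MOD)

-- ===== LEMMAS AND PROOFS =====

-- fmod depends only on the residue class of its first argument
lemma fmod_congr {m a b : Int} (h : a ≡ b [ZMOD m]) : a.fmod m = b.fmod m := by
  obtain ⟨k, hk⟩ := Int.ModEq.dvd h
  have hb : b = a + m * k := by linarith
  rw [hb, Int.add_mul_fmod_self_left]

lemma fmod_modEq (a m : Int) : a.fmod m ≡ a [ZMOD m] := by
  have h := Int.fmod_add_mul_fdiv a m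
  exact Int.modEq_iff_dvd.mpr ⟨a.fdiv m, by linarith⟩

lemma digit_cases {x : Char} (h : x.isDigit = true) :
    x = '0' ∨ x = '1' ∨ x = '2' ∨ x = '3' ∨ x = '4' ∨ x = '5' ∨ x = '6' ∨ x = '7' ∨ x = '8' ∨ x = '9' := by
  have hx : ∀ c : Char, x.toNat = c.toNat → x = c := fun c hc => Char.ext (UInt32.toNat_inj.mp hc)
  simp [Char.isDigit, UInt32.le_iff_toNat_le] at h
  have h2 : x.toNat = 48 ∨ x.toNat = 49 ∨ x.toNat = 50 ∨ x.toNat = 51 ∨ x.toNat = 52 ∨ x.toNat = 53 ∨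
      x.toNat = 54 ∨ x.toNat = 55 ∨ x.toNat = 56 ∨ x.toNat = 57 := by omega
  rcases h2 with h2|h2|h2|h2|h2|h2|h2|h2|h2|h2 <;>
    [left; (right;left); (right;right;left); (right;right;right;left); (right;right;right;right;left);
     (right;right;right;right;right;left); (right;right;right;right;right;right;left);
     (right;right;right;right;right;right;right;left); (right;right;right;right;right;right;right;right;left);
     (right;right;right;right;right;right;right;right;right)] <;> exact hx _ h2

lemma pyDigitInt_nonneg {x : Char} (h : x.isDigit = true) : 0 ≤ pyDigitInt x := by
  rcases digit_cases h with h|h|h|h|h|h|h|h|h|h <;> subst h <;> decide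

-- the decimal value (as a Nat) of a digit string
def digitsVal (l : List Char) : Nat := l.foldl (fun e x => e * 10 + (pyDigitInt x).toNat) 0

-- shifting the Nat accumulator out of the fold
lemma digitsVal_acc : ∀ (l : List Char), ∀ n : Nat,
    l.foldl (fun e x => e * 10 + (pyDigitInt x).toNat) n = n * 10 ^ l.length + digitsVal l := by
  intro l
  induction l with
  | nil => intro n; simp [digitsVal]
  | cons x t ih =>
    intro n
    have hc : digitsVal (x :: t) = t.foldl (fun e x => e * 10 + (pyDigitInt x).toNat) (0 * 10 + (pyDigitInt x).toNat) := by
      simp only [digitsVal, List.foldl_cons]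
    simp only [List.foldl_cons, List.length_cons, hc]
    rw [ih (n * 10 + (pyDigitInt x).toNat), ih (0 * 10 + (pyDigitInt x).toNat)]
    ring

lemma digitsVal_cons (x : Char) (t : List Char) :
    digitsVal (x :: t) = (pyDigitInt x).toNat * 10 ^ t.length + digitsVal t := by
  have hc : digitsVal (x :: t) = t.foldl (fun e x => e * 10 + (pyDigitInt x).toNat) (0 * 10 + (pyDigitInt x).toNat) := by
    simp only [digitsVal, List.foldl_cons]
  rw [hc, digitsVal_acc]
  ring

-- the Int exponent accumulator of B's loop equals the cast of the digit value
lemma expInt_eq_cast : ∀ (l : List Char), l.all Char.isDigit = true →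
    ∀ n : Nat, l.foldl (fun e x => e * 10 + pyDigitInt x) (n : Int)
      = ((l.foldl (fun e x => e * 10 + (pyDigitInt x).toNat) n : Nat) : Int) := by
  intro l
  induction l with
  | nil => intro _ n; rfl
  | cons x t ih =>
    intro h n
    simp only [List.all_cons, Bool.and_eq_true] at h
    have hd : 0 ≤ pyDigitInt x := pyDigitInt_nonneg h.1
    simp only [List.foldl_cons]
    have : (n : Int) * 10 + pyDigitInt x = ((n * 10 + (pyDigitInt x).toNat : Nat) : Int) := by
      push_cast [Int.toNat_of_nonneg hd]; ring
    rw [this, ih h.2]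

-- A's per-digit loop computes r^(10^len) * A^(decimal digit value) mod M
lemma expLoop (M A : Int) : ∀ (l : List Char), l ≠ [] → ∀ r : Int,
    l.foldl (fun res x =>
        PySem.Int.mod (PySem.Int.powMod res 10 M * PySem.Int.powMod A (pyDigitInt x).toNat M) M) r
      = (r ^ (10 ^ l.length) * A ^ digitsVal l).fmod M := by
  intro l
  induction l with
  | nil => intro h; exact absurd rfl h
  | cons x t ih =>
    intro _ r
    simp only [List.foldl_cons, List.length_cons]
    have hstep : PySem.Int.mod (PySem.Int.powMod r 10 M * PySem.Int.powMod A (pyDigitInt x).toNat M) M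
        = (r ^ 10 * A ^ (pyDigitInt x).toNat).fmod M := by
      simp only [PySem.Int.mod, PySem.Int.powMod]
      exact fmod_congr (Int.ModEq.mul (fmod_modEq _ _) (fmod_modEq _ _))
    cases t with
    | nil =>
      simp only [List.foldl_nil, List.length_nil]
      rw [hstep, digitsVal_cons]
      norm_num [digitsVal]
    | cons y u =>
      rw [hstep, ih (by simp)]
      apply fmod_congr
      have hm : (r ^ 10 * A ^ (pyDigitInt x).toNat).fmod M ≡ r ^ 10 * A ^ (pyDigitInt x).toNat [ZMOD M] :=
        fmod_modEq _ _
      rw [digitsVal_cons x (y :: u)]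
      have e1 : (r ^ 10 * A ^ (pyDigitInt x).toNat) ^ 10 ^ (y :: u).length * A ^ digitsVal (y :: u)
          = r ^ 10 ^ ((y :: u).length + 1) *
              A ^ ((pyDigitInt x).toNat * 10 ^ (y :: u).length + digitsVal (y :: u)) := by
        rw [mul_pow, ← pow_mul, ← pow_mul, pow_add, pow_succ]
        ring
      rw [← e1]
      exact Int.ModEq.mul (Int.ModEq.pow _ hm) (Int.ModEq.refl _)

-- Source B's while-loop computes (res * base^E) mod M (for positive E)
lemma powLoop_eq (M : Int) : ∀ (n : Nat) (E : Int), E.toNat = n → 0 < E → ∀ res base : Int,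
    powLoop M res base E = (res * base ^ E.toNat).fmod M := by
  intro n
  induction n using Nat.strong_induction_on with
  | _ n ih =>
    intro E hn hE res base
    rw [powLoop, dif_pos hE]
    have hd : PySem.Int.floordiv E 2 = E / 2 := PySem.Int.floordiv_eq_ediv_of_pos (by norm_num)
    have hband : PySem.Int.band E 1 = E % 2 := by
      rw [PySem.Int.band_one, PySem.Int.mod_eq_emod_of_pos (by norm_num)]
    rw [hd, hband]
    by_cases hk : 0 < E / 2
    · rw [ih (E / 2).toNat (by omega) (E / 2) rfl hk]
      apply fmod_congr
      have h2 : ((PySem.Int.mod (base * base) M) ^ (E / 2).toNat : Int)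
          ≡ (base * base) ^ (E / 2).toNat [ZMOD M] :=
        Int.ModEq.pow _ (fmod_modEq _ _)
      split_ifs with hb
      · have hEt : E.toNat = 2 * (E / 2).toNat + 1 := by omega
        calc (PySem.Int.mod (res * base) M) * (PySem.Int.mod (base * base) M) ^ (E / 2).toNat
            ≡ (res * base) * (base * base) ^ (E / 2).toNat [ZMOD M] :=
              Int.ModEq.mul (fmod_modEq _ _) h2
          _ = res * base ^ E.toNat := by rw [hEt]; ring
      · have hEt : E.toNat = 2 * (E / 2).toNat := by omega
        calc res * (PySem.Int.mod (base * base) M) ^ (E / 2).toNat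
            ≡ res * (base * base) ^ (E / 2).toNat [ZMOD M] := Int.ModEq.mul (Int.ModEq.refl _) h2
          _ = res * base ^ E.toNat := by rw [hEt]; ring
    · have hE1 : E = 1 := by omega
      subst hE1
      rw [powLoop]
      norm_num
      simp [PySem.Int.mod]

-- ===== VERDICT (by name: the statement is the Claim_ definition above) =====
theorem solve_spec : Claim_equal_solve := by
  intro strA strB MOD _hdom hpre
  unfold Spec_solve
  simp only [solve, solve_alt]
  obtain ⟨_hA, hB, _⟩ := hpre
  cases hEmp : strB.toList with
  | nil => simp
  | cons y u =>
    rw [hEmp] at hB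
    rw [if_neg (by simp)]
    rw [expLoop MOD _ (y :: u) (by simp) 1]
    have hE : (y :: u).foldl (fun e x => e * 10 + pyDigitInt x) 0
        = ((digitsVal (y :: u) : Nat) : Int) := by
      have h0 := expInt_eq_cast (y :: u) hB 0
      simpa [digitsVal] using h0
    rw [hE]
    set A0 := strA.toList.foldl (fun a x => PySem.Int.mod (a * 10 + pyDigitInt x) MOD) 0 with hA0
    by_cases hv : digitsVal (y :: u) = 0
    · rw [hv]
      rw [powLoop]
      norm_num [PySem.Int.mod]
    · have hpl := powLoop_eq MOD ((digitsVal (y :: u) : Int)).toNat ((digitsVal (y :: u) : Nat) : Int)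
        rfl (by exact_mod_cast Nat.pos_of_ne_zero hv) (PySem.Int.mod 1 MOD) (PySem.Int.mod A0 MOD)
      rw [hpl, Int.toNat_natCast]
      have hcong : PySem.Int.mod 1 MOD * (PySem.Int.mod A0 MOD) ^ digitsVal (y :: u)
          ≡ 1 * A0 ^ digitsVal (y :: u) [ZMOD MOD] :=
        Int.ModEq.mul (fmod_modEq 1 MOD) (Int.ModEq.pow _ (fmod_modEq A0 MOD))
      apply fmod_congr
      simpa using hcong.symm
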